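-- pv_equiv track=rewrite | github.com/opera22/cryptography-examples | examples/shift_cipher_encoder.py | create_shift_substitutions
-- ===== SOURCE A (Python) =====
-- import string
--
-- def create_shift_substitutions(n: int) -> tuple[dict, dict]:
--     encoding = {}
--     decoding = {}
--     # string.ascii_uppercase is a set: ABCDEFGHIJKLMNOPQRSTUVWXYZ
--     alphabet_size = len(string.ascii_uppercase)
--     for i in range(alphabet_size):
--         letter = string.ascii_uppercase[i]
--         subst_letter = string.ascii_uppercase[(i + n) % alphabet_size]
--
--         encoding[letter] = subst_letter
--         decoding[subst_letter] = letter
--     return encoding, decoding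
-- ===== SOURCE B (Python) =====
-- import string
--
-- def create_shift_substitutions(n: int) -> tuple[dict, dict]:
--     k = n % 26
--     rotated = string.ascii_uppercase[k:] + string.ascii_uppercase[:k]
--     encoding = dict(zip(string.ascii_uppercase, rotated))
--     decoding = dict(zip(rotated, string.ascii_uppercase))
--     return encoding, decoding
-- ===== Notes on version B (the rewrite author's own statement) =====
-- stated objective: idiomatic
-- what changed: Replaces the per-index modular-arithmetic loop with one slice-based rotation of the alphabet and two dict(zip(...)) constructions.
import Mathlib
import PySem

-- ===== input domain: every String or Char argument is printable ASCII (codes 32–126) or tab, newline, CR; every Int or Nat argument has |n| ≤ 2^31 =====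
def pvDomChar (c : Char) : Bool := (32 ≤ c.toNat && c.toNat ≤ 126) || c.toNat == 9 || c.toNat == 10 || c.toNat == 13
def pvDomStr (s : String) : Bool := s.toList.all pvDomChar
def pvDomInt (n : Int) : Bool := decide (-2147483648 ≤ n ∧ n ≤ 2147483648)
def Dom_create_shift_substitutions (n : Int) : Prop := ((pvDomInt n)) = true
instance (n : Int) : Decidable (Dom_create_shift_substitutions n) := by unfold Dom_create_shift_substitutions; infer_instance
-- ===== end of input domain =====

-- B builds both dicts from one slice-based rotation of the alphabet instead of A's per-index modular loop (idiomatic; same cost).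

-- string.ascii_uppercase, as the list of its one-character strings (Python s[i] is a 1-char str)
def pvUpper : List String :=
  ["A","B","C","D","E","F","G","H","I","J","K","L","M","N","O","P","Q","R","S","T","U","V","W","X","Y","Z"]

-- ===== PORT A =====
def create_shift_substitutions (n : Int) : (List (String × String)) × (List (String × String)) :=
  let alphabet_size : Int := (pvUpper.length : Int)
  let st := (PySem.List.pyRange 0 alphabet_size 1).foldl
    (fun (st : PySem.Dict String String × PySem.Dict String String) i =>
      let letter := PySem.List.pyGetD pvUpper i ""
      let subst_letter := PySem.List.pyGetD pvUpper (PySem.Int.mod (i + n) alphabet_size) ""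
      (st.1.insert letter subst_letter, st.2.insert subst_letter letter))
    (PySem.Dict.empty, PySem.Dict.empty)
  (st.1.items, st.2.items)

-- ===== PORT B =====
def create_shift_substitutions_alt (n : Int) : (List (String × String)) × (List (String × String)) :=
  let k := PySem.Int.mod n 26
  let rotated := PySem.List.slice pvUpper (some k) none ++ PySem.List.slice pvUpper none (some k)
  let encoding := PySem.Dict.ofList (pvUpper.zip rotated)
  let decoding := PySem.Dict.ofList (rotated.zip pvUpper)
  (encoding.items, decoding.items)

-- ===== PRECONDITION & SPEC =====
def Spec_create_shift_substitutions (n : Int) (out : (List (String × String)) × (List (String × String))) : Prop := out = create_shift_substitutions_alt n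
instance (n : Int) (out : (List (String × String)) × (List (String × String))) : Decidable (Spec_create_shift_substitutions n out) := by unfold Spec_create_shift_substitutions; infer_instance

-- ===== CLAIM (what is proved, stated in full; the proofs are below) =====
def Claim_equal_create_shift_substitutions : Prop := ∀ (n : Int), Dom_create_shift_substitutions n → Spec_create_shift_substitutions n (create_shift_substitutions n)

-- ===== LEMMAS AND PROOFS =====

-- A depends on n only through n mod 26
theorem pvA_mod (n : Int) :
    create_shift_substitutions n = create_shift_substitutions (PySem.Int.mod n 26) := by
  unfold create_shift_substitutions
  have hlen : ((pvUpper.length : Nat) : Int) = 26 := by decide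
  simp only [hlen]
  have hfun :
      (fun (st : PySem.Dict String String × PySem.Dict String String) (i : Int) =>
        (st.1.insert (PySem.List.pyGetD pvUpper i "") (PySem.List.pyGetD pvUpper (PySem.Int.mod (i + n) 26) ""),
         st.2.insert (PySem.List.pyGetD pvUpper (PySem.Int.mod (i + n) 26) "") (PySem.List.pyGetD pvUpper i ""))) =
      (fun (st : PySem.Dict String String × PySem.Dict String String) (i : Int) =>
        (st.1.insert (PySem.List.pyGetD pvUpper i "") (PySem.List.pyGetD pvUpper (PySem.Int.mod (i + PySem.Int.mod n 26) 26) ""),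
         st.2.insert (PySem.List.pyGetD pvUpper (PySem.Int.mod (i + PySem.Int.mod n 26) 26) "") (PySem.List.pyGetD pvUpper i ""))) := by
    funext st i
    have h : PySem.Int.mod (i + n) 26 = PySem.Int.mod (i + PySem.Int.mod n 26) 26 := by
      simp only [PySem.Int.mod_eq_emod_of_pos (by omega : (0:Int) < 26)]
      omega
    rw [h]
  rw [hfun]

-- B depends on n only through n mod 26
theorem pvB_mod (n : Int) :
    create_shift_substitutions_alt n = create_shift_substitutions_alt (PySem.Int.mod n 26) := by
  unfold create_shift_substitutions_alt
  have h : PySem.Int.mod (PySem.Int.mod n 26) 26 = PySem.Int.mod n 26 := by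
    simp only [PySem.Int.mod_eq_emod_of_pos (by omega : (0:Int) < 26)]
    omega
  rw [h]

theorem pv_small : ∀ m : Int, 0 ≤ m → m < 26 →
    create_shift_substitutions m = create_shift_substitutions_alt m := by
  intro m h1 h2
  interval_cases m <;> decide

-- ===== VERDICT (by name: the statement is the Claim_ definition above) =====
theorem create_shift_substitutions_spec : Claim_equal_create_shift_substitutions := by
  intro n _
  unfold Spec_create_shift_substitutions
  rw [pvA_mod n, pvB_mod n]
  exact pv_small _ (PySem.Int.mod_nonneg n (by omega)) (PySem.Int.mod_lt n (by omega))
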